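-- pv_equiv track=rewrite | github.com/JavierGalvez/Practicas-Grado | CRIP/funciones_solo_sentido.py | merkle_damgard
-- ===== SOURCE A (Python) =====
-- def merkle_damgard(v_inicial, mensaje, n, a0, a1):
--     """Implementación de una función resumen usando la construcción de Merkle-Damgard
--     y tomando la función h(b, x) = x^2 * a0^b * a1^(1-b) como función de compresión.
--
--     Input: v_inicial, vector inicial.
--            mensaje, secuencia de bits de la que se obtiene el resumen.
--            n, un número primo lo suficientemente grande.
--            a0, a1 dos cuadrados arbitrarios módulo n.
--     """
--
--     # Función de compresión
--     def h(b, x):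
--         val = pow(x, 2, n)
--         if b == 1:
--             val = (val*a0) % n
--         else:
--             val = (val*a1) % n
--         return val
--
--     # h(b2, h(b1, h(b0, x)))
--     x = v_inicial
--     for b in mensaje:
--         x = h(b, x)
--
--     return x
-- ===== SOURCE B (Python) =====
-- def merkle_damgard(v_inicial, mensaje, n, a0, a1):
--     """Closed-form Merkle-Damgard: one pass packs the message into an integer M
--     and a bit count k; the answer is v^(2^k) * a0^M * a1^(2^k-1-M) mod n."""
--     M = 0
--     k = 0
--     for b in mensaje:
--         M = 2 * M + (1 if b == 1 else 0)
--         k += 1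
--     if k == 0:
--         return v_inicial
--     return (pow(v_inicial, 2 ** k, n) * pow(a0, M, n) % n) * pow(a1, 2 ** k - 1 - M, n) % n
-- ===== Notes on version B (the rewrite author's own statement) =====
-- stated objective: alternative
-- what changed: The step-by-step fold of the compression function h over the message is replaced by a closed form: one pass packs the bits into an integer M and a count k, and the result is computed as v^(2^k)*a0^M*a1^(2^k-1-M) mod n via three modular exponentiations.
import Mathlib
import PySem

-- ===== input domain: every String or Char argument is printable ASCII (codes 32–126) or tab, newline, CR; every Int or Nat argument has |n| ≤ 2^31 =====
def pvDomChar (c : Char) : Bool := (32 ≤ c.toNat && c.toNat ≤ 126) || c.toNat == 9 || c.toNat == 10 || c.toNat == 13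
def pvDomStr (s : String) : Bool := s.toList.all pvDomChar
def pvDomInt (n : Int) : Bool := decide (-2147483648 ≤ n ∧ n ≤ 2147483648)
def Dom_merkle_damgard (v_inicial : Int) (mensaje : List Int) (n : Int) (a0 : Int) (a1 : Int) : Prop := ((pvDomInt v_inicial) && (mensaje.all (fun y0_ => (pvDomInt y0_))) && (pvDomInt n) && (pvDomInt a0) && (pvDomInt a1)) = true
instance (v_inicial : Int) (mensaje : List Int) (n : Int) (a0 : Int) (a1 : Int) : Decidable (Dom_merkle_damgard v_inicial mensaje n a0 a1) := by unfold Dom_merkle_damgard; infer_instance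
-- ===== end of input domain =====

-- B replaces A's step-by-step fold of the compression function by a one-pass bit-packing
-- plus a closed-form product of three modular powers (alternative decomposition, same cost).


-- ===== PORT A =====
-- A's inner compression function h(b, x): pow(x, 2, n) is PySem.Int.mod (x^2) n (n ≠ 0 is in Pre_)
def mdStep (n a0 a1 : Int) (x b : Int) : Int :=
  let val := PySem.Int.mod (x ^ 2) n
  if b == 1 then PySem.Int.mod (val * a0) n else PySem.Int.mod (val * a1) n

def merkle_damgard (v_inicial : Int) (mensaje : List Int) (n : Int) (a0 : Int) (a1 : Int) : Int :=
  mensaje.foldl (mdStep n a0 a1) v_inicial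

-- ===== PORT B =====
-- B's accumulation loop: M = 2*M + (1 if b == 1 else 0); k += 1
def mdAcc (p : Nat × Nat) (b : Int) : Nat × Nat :=
  (2 * p.1 + (if b == 1 then 1 else 0), p.2 + 1)

def merkle_damgard_alt (v_inicial : Int) (mensaje : List Int) (n : Int) (a0 : Int) (a1 : Int) : Int :=
  -- one pass packs the message: p = (M, k)
  let p := mensaje.foldl mdAcc (0, 0)
  if p.2 = 0 then v_inicial
  else
    PySem.Int.mod
      (PySem.Int.mod (PySem.Int.powMod v_inicial (2 ^ p.2) n * PySem.Int.powMod a0 p.1 n) n *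
        PySem.Int.powMod a1 (2 ^ p.2 - 1 - p.1) n) n

-- ===== PRECONDITION & SPEC =====
-- Python's pow(_, _, n) raises ValueError for n = 0; on an empty message A never calls pow.
def Pre_merkle_damgard (_v_inicial : Int) (mensaje : List Int) (n : Int) (_a0 : Int) (_a1 : Int) : Prop :=
  mensaje = [] ∨ n ≠ 0
instance (v_inicial : Int) (mensaje : List Int) (n : Int) (a0 : Int) (a1 : Int) : Decidable (Pre_merkle_damgard v_inicial mensaje n a0 a1) := by unfold Pre_merkle_damgard; infer_instance

def pvWitness_merkle_damgard : Int × List Int × Int × Int × Int := (3, [1, 0, 1], 7, 4, 2)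

def Spec_merkle_damgard (v_inicial : Int) (mensaje : List Int) (n : Int) (a0 : Int) (a1 : Int) (out : Int) : Prop := out = merkle_damgard_alt v_inicial mensaje n a0 a1
instance (v_inicial : Int) (mensaje : List Int) (n : Int) (a0 : Int) (a1 : Int) (out : Int) : Decidable (Spec_merkle_damgard v_inicial mensaje n a0 a1 out) := by unfold Spec_merkle_damgard; infer_instance

-- ===== CLAIM (what is proved, stated in full; the proofs are below) =====
def Claim_equal_merkle_damgard : Prop := ∀ (v_inicial : Int) (mensaje : List Int) (n : Int) (a0 : Int) (a1 : Int), Dom_merkle_damgard v_inicial mensaje n a0 a1 → Pre_merkle_damgard v_inicial mensaje n a0 a1 → Spec_merkle_damgard v_inicial mensaje n a0 a1 (merkle_damgard v_inicial mensaje n a0 a1)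

-- ===== LEMMAS AND PROOFS =====

-- Python's % is Int.fmod; its emod class is the same as the argument's.
theorem pv_fmod_emod (a n : Int) : (a.fmod n) % n = a % n := by
  rw [Int.fmod_eq_emod]
  split_ifs with h
  · simp [Int.emod_emod_of_dvd a (dvd_refl n)]
  · rw [Int.add_emod_right, Int.emod_emod_of_dvd a (dvd_refl n)]

theorem pv_fmod_congr {a b n : Int} (h : a % n = b % n) : a.fmod n = b.fmod n := by
  have hd : (n ∣ a) ↔ (n ∣ b) := by
    rw [Int.dvd_iff_emod_eq_zero, Int.dvd_iff_emod_eq_zero, h]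
  rw [Int.fmod_eq_emod, Int.fmod_eq_emod, h]
  split_ifs with h1 h2 <;> first | rfl | (exfalso; tauto)

theorem pv_fmod_idem (a n : Int) : (a.fmod n).fmod n = a.fmod n :=
  pv_fmod_congr (pv_fmod_emod a n)

-- second component of the accumulator counts the message length
theorem mdAcc_len : ∀ (m : List Int) (p : Nat × Nat), (m.foldl mdAcc p).2 = p.2 + m.length := by
  intro m
  induction m with
  | nil => simp
  | cons b m ih => intro p; simp [List.foldl_cons, ih, mdAcc]; omega

-- the packed message M stays below 2^k
theorem mdAcc_bound : ∀ (m : List Int) (p : Nat × Nat), p.1 < 2 ^ p.2 →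
    (m.foldl mdAcc p).1 < 2 ^ (m.foldl mdAcc p).2 := by
  intro m
  induction m with
  | nil => intro p h; simpa using h
  | cons b m ih =>
    intro p h
    simp only [List.foldl_cons]
    apply ih
    simp only [mdAcc, pow_succ]
    split_ifs <;> omega

-- the emod class of A's fold is the closed-form product's
theorem md_emod_inv (n a0 a1 : Int) : ∀ (m : List Int) (v : Int),
    (m.foldl (mdStep n a0 a1) v) % n =
      (v ^ (2 ^ (m.foldl mdAcc ((0, 0) : Nat × Nat)).2) *
        a0 ^ (m.foldl mdAcc ((0, 0) : Nat × Nat)).1 *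
        a1 ^ (2 ^ (m.foldl mdAcc ((0, 0) : Nat × Nat)).2 - 1 - (m.foldl mdAcc ((0, 0) : Nat × Nat)).1)) % n := by
  intro m
  induction m using List.reverseRecOn with
  | nil => intro v; simp
  | append_singleton m b ih =>
    intro v
    have hL : (m ++ [b]).foldl (mdStep n a0 a1) v = mdStep n a0 a1 (m.foldl (mdStep n a0 a1) v) b := by
      simp [List.foldl_append]
    have hR : (m ++ [b]).foldl mdAcc ((0, 0) : Nat × Nat) = mdAcc (m.foldl mdAcc ((0, 0) : Nat × Nat)) b := by
      simp [List.foldl_append]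
    set x := m.foldl (mdStep n a0 a1) v with hx
    set M := (m.foldl mdAcc ((0, 0) : Nat × Nat)).1 with hM
    set k := (m.foldl mdAcc ((0, 0) : Nat × Nat)).2 with hk
    have hb : M < 2 ^ k := mdAcc_bound m (0, 0) (by norm_num)
    have hx2 : x ^ 2 % n = ((v ^ 2 ^ k * a0 ^ M * a1 ^ (2 ^ k - 1 - M)) ^ 2) % n :=
      Int.ModEq.pow 2 (ih v)
    rw [hL, hR]
    simp only [mdStep, mdAcc]
    split_ifs with hbit
    · -- b == 1
      calc PySem.Int.mod (PySem.Int.mod (x ^ 2) n * a0) n % n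
          = (x ^ 2 * a0) % n := by
            simp only [PySem.Int.mod]
            rw [pv_fmod_emod, Int.mul_emod, pv_fmod_emod, ← Int.mul_emod]
        _ = ((v ^ 2 ^ k * a0 ^ M * a1 ^ (2 ^ k - 1 - M)) ^ 2 * a0) % n := by
            rw [Int.mul_emod, hx2, ← Int.mul_emod]
        _ = (v ^ 2 ^ (k + 1) * a0 ^ (2 * M + 1) * a1 ^ (2 ^ (k + 1) - 1 - (2 * M + 1))) % n := by
            congr 1
            have e1 : 2 ^ (k + 1) = 2 ^ k * 2 := by rw [pow_succ]
            have e2 : 2 * M + 1 = M * 2 + 1 := by omega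
            have e3 : 2 ^ k * 2 - 1 - (M * 2 + 1) = (2 ^ k - 1 - M) * 2 := by omega
            rw [e1, e2, e3]
            ring
    · calc PySem.Int.mod (PySem.Int.mod (x ^ 2) n * a1) n % n
          = (x ^ 2 * a1) % n := by
            simp only [PySem.Int.mod]
            rw [pv_fmod_emod, Int.mul_emod, pv_fmod_emod, ← Int.mul_emod]
        _ = ((v ^ 2 ^ k * a0 ^ M * a1 ^ (2 ^ k - 1 - M)) ^ 2 * a1) % n := by
            rw [Int.mul_emod, hx2, ← Int.mul_emod]
        _ = (v ^ 2 ^ (k + 1) * a0 ^ (2 * M + 0) * a1 ^ (2 ^ (k + 1) - 1 - (2 * M + 0))) % n := by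
            congr 1
            have e1 : 2 ^ (k + 1) = 2 ^ k * 2 := by rw [pow_succ]
            have e2 : 2 * M + 0 = M * 2 := by omega
            have e3 : 2 ^ k * 2 - 1 - M * 2 = (2 ^ k - 1 - M) * 2 + 1 := by omega
            rw [e1, e2, e3]
            ring

-- a nonempty fold of A ends in an fmod, hence is fmod-fixed
theorem md_foldl_fixed (n a0 a1 v : Int) (m : List Int) (h : m ≠ []) :
    (m.foldl (mdStep n a0 a1) v).fmod n = m.foldl (mdStep n a0 a1) v := by
  rcases m.eq_nil_or_concat with rfl | ⟨m', b, rfl⟩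
  · exact absurd rfl h
  · rw [List.concat_eq_append, List.foldl_append]
    simp only [List.foldl_cons, List.foldl_nil, mdStep]
    split_ifs <;> exact pv_fmod_idem _ n

-- ===== VERDICT (by name: the statement is the Claim_ definition above) =====
theorem merkle_damgard_spec : Claim_equal_merkle_damgard := by
  intro v m n a0 a1 _ _
  unfold Spec_merkle_damgard merkle_damgard merkle_damgard_alt
  rcases eq_or_ne m [] with rfl | hm
  · simp
  · rcases hp : m.foldl mdAcc ((0, 0) : Nat × Nat) with ⟨M, k⟩
    have hk0 : k ≠ 0 := by
      have hlen := mdAcc_len m (0, 0)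
      rw [hp] at hlen
      intro h0
      exact hm (List.length_eq_zero_iff.mp (by omega))
    rw [if_neg hk0, ← md_foldl_fixed n a0 a1 v m hm]
    simp only [PySem.Int.mod, PySem.Int.powMod]
    apply pv_fmod_congr
    have g1 : Int.ModEq n ((v ^ 2 ^ k).fmod n) (v ^ 2 ^ k) := pv_fmod_emod _ n
    have g2 : Int.ModEq n ((a0 ^ M).fmod n) (a0 ^ M) := pv_fmod_emod _ n
    have g3 : Int.ModEq n ((a1 ^ (2 ^ k - 1 - M)).fmod n) (a1 ^ (2 ^ k - 1 - M)) :=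
      pv_fmod_emod _ n
    have g12 : Int.ModEq n (((v ^ 2 ^ k).fmod n * (a0 ^ M).fmod n).fmod n)
        (v ^ 2 ^ k * a0 ^ M) :=
      Int.ModEq.trans (pv_fmod_emod _ n) (g1.mul g2)
    have hB : Int.ModEq n
        (((v ^ 2 ^ k).fmod n * (a0 ^ M).fmod n).fmod n * (a1 ^ (2 ^ k - 1 - M)).fmod n)
        (v ^ 2 ^ k * a0 ^ M * a1 ^ (2 ^ k - 1 - M)) := g12.mul g3
    have inv := md_emod_inv n a0 a1 m v
    rw [hp] at inv
    exact (inv.trans hB.symm : Int.ModEq n _ _)
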